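-- pv_equiv track=rewrite | github.com/MrBrantCode/unitest_baseline | mut_generate/mist_train_taco/taco_1296/solution.py | compute_fibonacci_like_sequences
-- ===== SOURCE A (Python) =====
-- def compute_fibonacci_like_sequences(a, b, c, d, e, f, g, h, n):
--     """
--     Computes the values of x_n and y_n for given parameters using matrix exponentiation.
--
--     Parameters:
--     a, b, c, d, e, f, g, h (int): Positive integers defining the sequences.
--     n (int): The index for which to compute x_n and y_n.
--
--     Returns:
--     tuple: A tuple containing two integers (x_n % 10^9, y_n % 10^9).
--     """
--     from operator import mul
--
--     def matrixMult(m1, m2, d):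
--         m2tr = list(zip(*m2))
--         return [[sum(map(mul, m1row, m2col)) % d for m2col in m2tr] for m1row in m1]
--
--     def matrixVectorMult(m, v):
--         return [sum(map(mul, mrow, v)) for mrow in m]
--
--     def matrixPowMod(mat, p, d):
--         dim = len(mat)
--         cur = [[i == j and 1 or 0 for j in range(dim)] for i in range(dim)]
--         for c in bin(p)[2:]:
--             cur = matrixMult(cur, cur, d)
--             if c == '1':
--                 cur = matrixMult(cur, mat, d)
--         return cur
--
--     modulo = 10 ** 9
--     mat = [[0] * 22 for i in range(22)]
--     mat[0][1] = mat[1][2] = mat[2][3] = mat[3][4] = mat[4][5] = mat[5][6] = mat[6][7] = mat[7][8] = 1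
--     mat[8][9 - a] += 1
--     mat[8][20 - b] += 1
--     mat[8][20 - c] += 1
--     mat[8][9] = mat[8][10] = mat[9][9] = mat[9][10] = mat[10][10] = d
--     mat[11][12] = mat[12][13] = mat[13][14] = mat[14][15] = mat[15][16] = mat[16][17] = mat[17][18] = mat[18][19] = 1
--     mat[19][20 - e] += 1
--     mat[19][9 - f] += 1
--     mat[19][9 - g] += 1
--     mat[19][20] = mat[19][21] = mat[20][20] = mat[20][21] = mat[21][21] = h
--     vec = [1] * 22
--     vec[8] = vec[19] = 3
--     vec[9] = vec[20] = 0
--     resultVec = matrixVectorMult(matrixPowMod(mat, n, modulo), vec)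
--     return resultVec[8] % modulo, resultVec[19] % modulo
-- ===== SOURCE B (Python) =====
-- def compute_fibonacci_like_sequences(a, b, c, d, e, f, g, h, n):
--     """Same 22x22 transition matrix as the original, but the power is applied
--     LSB-first ('result' vector + squared 'base' matrix): the result matrix is
--     never formed, only a vector accumulator is kept."""
--     modulo = 10 ** 9
--
--     mat = [[0] * 22 for i in range(22)]
--     mat[0][1] = mat[1][2] = mat[2][3] = mat[3][4] = mat[4][5] = mat[5][6] = mat[6][7] = mat[7][8] = 1
--     mat[8][9 - a] += 1
--     mat[8][20 - b] += 1
--     mat[8][20 - c] += 1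
--     mat[8][9] = mat[8][10] = mat[9][9] = mat[9][10] = mat[10][10] = d
--     mat[11][12] = mat[12][13] = mat[13][14] = mat[14][15] = mat[15][16] = mat[16][17] = mat[17][18] = mat[18][19] = 1
--     mat[19][20 - e] += 1
--     mat[19][9 - f] += 1
--     mat[19][9 - g] += 1
--     mat[19][20] = mat[19][21] = mat[20][20] = mat[20][21] = mat[21][21] = h
--     vec = [1] * 22
--     vec[8] = vec[19] = 3
--     vec[9] = vec[20] = 0
--
--     def mat_mul(p, q):
--         return [[sum(p[i][k] * q[k][j] for k in range(22)) % modulo for j in range(22)]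
--                 for i in range(22)]
--
--     def mat_vec(p, u):
--         return [sum(p[i][k] * u[k] for k in range(22)) % modulo for i in range(22)]
--
--     v = vec
--     base = mat
--     k = n
--     while k > 0:
--         if k & 1:
--             v = mat_vec(base, v)
--         base = mat_mul(base, base)
--         k >>= 1
--     return v[8] % modulo, v[19] % modulo
-- ===== Notes on version B (the rewrite author's own statement) =====
-- stated objective: alternative
-- what changed: A builds the full 22x22 power matrix by MSB-first square-and-multiply over the bin(n) string and only then multiplies the vector; B walks the bits LSB-first via n&1 / n>>=1, squaring the base matrix and folding it directly into a vector accumulator, so the power matrix is never formed and 1-bits cost a 22^2 matrix-vector product instead of a 22^3 matrix product.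
-- outside the precondition, e.g. on compute_fibonacci_like_sequences(1, 1, 1, 1, 1, 1, 1, 1, -1): A returns (10, 10), B returns (3, 3)
import Mathlib
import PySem

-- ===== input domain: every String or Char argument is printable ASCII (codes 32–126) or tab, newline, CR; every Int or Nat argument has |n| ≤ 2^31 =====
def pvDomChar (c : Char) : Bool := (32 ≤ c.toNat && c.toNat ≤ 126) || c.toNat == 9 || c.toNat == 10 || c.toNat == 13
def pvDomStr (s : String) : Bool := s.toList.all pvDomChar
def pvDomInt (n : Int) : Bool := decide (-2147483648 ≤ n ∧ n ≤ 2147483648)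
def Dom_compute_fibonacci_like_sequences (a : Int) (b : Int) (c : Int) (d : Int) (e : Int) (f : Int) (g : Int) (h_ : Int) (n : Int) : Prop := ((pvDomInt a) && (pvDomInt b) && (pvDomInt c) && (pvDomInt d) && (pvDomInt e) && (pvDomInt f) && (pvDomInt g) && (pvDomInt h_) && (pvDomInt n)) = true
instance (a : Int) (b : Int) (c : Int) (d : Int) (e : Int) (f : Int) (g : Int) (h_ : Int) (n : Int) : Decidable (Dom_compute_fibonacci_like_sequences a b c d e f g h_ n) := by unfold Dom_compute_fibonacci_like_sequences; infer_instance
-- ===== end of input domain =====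

-- B replaces A's MSB-first square-and-multiply over the bin(n) string (which builds the full
-- 22x22 power matrix) by an LSB-first square-and-multiply that folds the matrix directly into a
-- vector accumulator; objective: alternative (same asymptotic cost, the power matrix is never formed).

-- ===== PORT A =====
-- Both Python sources build the matrix and the start vector with the SAME literal assignment
-- sequence, so that construction is a shared helper (transliterated once, used by both ports).
-- mat[i][j] = v  with literal nonnegative indices:
def pvSetAt (m : List (List Int)) (i j : Nat) (v : Int) : List (List Int) :=
  m.set i ((m[i]!).set j v)

-- mat[i][j] += 1  with a possibly negative dynamic column index j (none = IndexError):
def pvRowAdd (m : List (List Int)) (i : Nat) (j : Int) : Option (List (List Int)) :=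
  match PySem.List.pyGet? (m[i]!) j with
  | none => none
  | some x => (PySem.List.pySet? (m[i]!) j (x + 1)).map (fun r => m.set i r)

-- the literal assignment sequence shared by Source A and Source B ('mat = ...' down to the last 'mat[21][21] = h')
def pvMatData (a b c d e f g h_ : Int) : Option (List (List Int)) :=
  let m := List.replicate 22 (List.replicate 22 (0 : Int))
  let m := pvSetAt m 0 1 1
  let m := pvSetAt m 1 2 1
  let m := pvSetAt m 2 3 1
  let m := pvSetAt m 3 4 1
  let m := pvSetAt m 4 5 1
  let m := pvSetAt m 5 6 1
  let m := pvSetAt m 6 7 1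
  let m := pvSetAt m 7 8 1
  match pvRowAdd m 8 (9 - a) with
  | none => none
  | some m =>
  match pvRowAdd m 8 (20 - b) with
  | none => none
  | some m =>
  match pvRowAdd m 8 (20 - c) with
  | none => none
  | some m =>
  let m := pvSetAt m 8 9 d
  let m := pvSetAt m 8 10 d
  let m := pvSetAt m 9 9 d
  let m := pvSetAt m 9 10 d
  let m := pvSetAt m 10 10 d
  let m := pvSetAt m 11 12 1
  let m := pvSetAt m 12 13 1
  let m := pvSetAt m 13 14 1
  let m := pvSetAt m 14 15 1
  let m := pvSetAt m 15 16 1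
  let m := pvSetAt m 16 17 1
  let m := pvSetAt m 17 18 1
  let m := pvSetAt m 18 19 1
  match pvRowAdd m 19 (20 - e) with
  | none => none
  | some m =>
  match pvRowAdd m 19 (9 - f) with
  | none => none
  | some m =>
  match pvRowAdd m 19 (9 - g) with
  | none => none
  | some m =>
  let m := pvSetAt m 19 20 h_
  let m := pvSetAt m 19 21 h_
  let m := pvSetAt m 20 20 h_
  let m := pvSetAt m 20 21 h_
  let m := pvSetAt m 21 21 h_
  some m

-- vec = [1]*22; vec[8] = vec[19] = 3; vec[9] = vec[20] = 0   (shared by both sources)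
def pvVecData : List Int :=
  ((((List.replicate 22 (1 : Int)).set 8 3).set 19 3).set 9 0).set 20 0

-- zip(*m2)  (Python zip of the rows: truncates at the first exhausted row)
def pvZipStar (m : List (List Int)) : List (List Int) :=
  if h : m ≠ [] ∧ ∀ r ∈ m, r ≠ [] then
    (m.map (fun r => r.headI)) :: pvZipStar (m.map (fun r => r.tail))
  else []
termination_by m.headI.length
decreasing_by
  obtain ⟨h1, h2⟩ := h
  cases m with
  | nil => exact absurd rfl h1
  | cons x xs =>
    have hx : x ≠ [] := h2 x (List.mem_cons_self ..)
    cases x with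
    | nil => exact absurd rfl hx
    | cons y ys => simp [List.headI]

-- matrixMult(m1, m2, d)
def pvMatMult (m1 m2 : List (List Int)) (dd : Int) : List (List Int) :=
  let m2tr := pvZipStar m2
  m1.map (fun row => m2tr.map (fun col => PySem.Int.mod (List.zipWith (fun x y => x * y) row col).sum dd))

-- matrixVectorMult(m, v)
def pvMatVecMult (m : List (List Int)) (v : List Int) : List Int :=
  m.map (fun row => (List.zipWith (fun x y => x * y) row v).sum)

-- bin(m) without the '0b' prefix, for m : Nat (MSB first; bin(0)[2:] = "0")
def pvBinNat (m : Nat) : List Char :=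
  if m < 2 then [if m = 1 then '1' else '0']
  else pvBinNat (m / 2) ++ [if m % 2 = 1 then '1' else '0']
termination_by m
decreasing_by exact Nat.div_lt_self (by omega) (by omega)

-- bin(p)[2:] for p : Int (for negative p Python gives '-0b...', whose [2:] starts with 'b')
def pvBinTail (p : Int) : List Char :=
  if p < 0 then 'b' :: pvBinNat p.natAbs else pvBinNat p.toNat

-- matrixPowMod(mat, p, d)
def pvMatPowMod (mat : List (List Int)) (p : Int) (dd : Int) : List (List Int) :=
  let dim := mat.length
  let cur := (List.range dim).map (fun i => (List.range dim).map (fun j => if i = j then (1 : Int) else 0))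
  (pvBinTail p).foldl
    (fun cur c =>
      let cur2 := pvMatMult cur cur dd
      if c = '1' then pvMatMult cur2 mat dd else cur2)
    cur

def compute_fibonacci_like_sequences (a : Int) (b : Int) (c : Int) (d : Int) (e : Int) (f : Int) (g : Int) (h_ : Int) (n : Int) : Int × Int :=
  match pvMatData a b c d e f g h_ with
  | none => (0, 0)  -- Python raises IndexError here; excluded by Pre_
  | some mat =>
    let modulo : Int := 10 ^ 9
    let resultVec := pvMatVecMult (pvMatPowMod mat n modulo) pvVecData
    (PySem.Int.mod (resultVec[8]!) modulo, PySem.Int.mod (resultVec[19]!) modulo)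

-- ===== PORT B =====
-- mat_mul(p, q)   (entries reduced mod 'modulo', explicit range(22) indexing)
def pvAltMatMul (p q : List (List Int)) (md : Int) : List (List Int) :=
  (List.range 22).map (fun i =>
    (List.range 22).map (fun j =>
      PySem.Int.mod (((List.range 22).map (fun k => (p[i]!)[k]! * (q[k]!)[j]!)).sum) md))

-- mat_vec(p, u)
def pvAltMatVec (p : List (List Int)) (u : List Int) (md : Int) : List Int :=
  (List.range 22).map (fun i =>
    PySem.Int.mod (((List.range 22).map (fun k => (p[i]!)[k]! * u[k]!)).sum) md)

-- while k > 0: if k & 1: v = mat_vec(base, v); base = mat_mul(base, base); k >>= 1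
def pvAltLoop (base : List (List Int)) (v : List Int) (k : Nat) (md : Int) : List Int :=
  if k = 0 then v
  else pvAltLoop (pvAltMatMul base base md) (if k % 2 = 1 then pvAltMatVec base v md else v) (k / 2) md
termination_by k
decreasing_by exact Nat.div_lt_self (by omega) (by omega)

def compute_fibonacci_like_sequences_alt (a : Int) (b : Int) (c : Int) (d : Int) (e : Int) (f : Int) (g : Int) (h_ : Int) (n : Int) : Int × Int :=
  match pvMatData a b c d e f g h_ with
  | none => (0, 0)  -- Python raises IndexError here; excluded by Pre_
  | some mat =>
    let modulo : Int := 10 ^ 9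
    let v := pvAltLoop mat pvVecData n.toNat modulo
    (PySem.Int.mod (v[8]!) modulo, PySem.Int.mod (v[19]!) modulo)

-- ===== PRECONDITION & SPEC =====
-- Pre_ keeps exactly the inputs where all six 'mat[...][...] += 1' column indices are in range
-- (outside them A raises IndexError) and excludes n < 0, where A's bin(n)[2:] string handling
-- accidentally computes the |n|-th term while B's bit loop runs zero times — both values are
-- accidental on a nonsensical negative index.
def Pre_compute_fibonacci_like_sequences (a : Int) (b : Int) (c : Int) (d : Int) (e : Int) (f : Int) (g : Int) (h_ : Int) (n : Int) : Prop :=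
  -12 ≤ a ∧ a ≤ 31 ∧ -1 ≤ b ∧ b ≤ 42 ∧ -1 ≤ c ∧ c ≤ 42 ∧ -1 ≤ e ∧ e ≤ 42 ∧
  -12 ≤ f ∧ f ≤ 31 ∧ -12 ≤ g ∧ g ≤ 31 ∧ 0 ≤ n
instance (a : Int) (b : Int) (c : Int) (d : Int) (e : Int) (f : Int) (g : Int) (h_ : Int) (n : Int) : Decidable (Pre_compute_fibonacci_like_sequences a b c d e f g h_ n) := by unfold Pre_compute_fibonacci_like_sequences; infer_instance

def pvWitness_compute_fibonacci_like_sequences : Int × Int × Int × Int × Int × Int × Int × Int × Int := (1, 2, 3, 4, 5, 6, 7, 8, 5)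

def Spec_compute_fibonacci_like_sequences (a : Int) (b : Int) (c : Int) (d : Int) (e : Int) (f : Int) (g : Int) (h_ : Int) (n : Int) (out : Int × Int) : Prop := out = compute_fibonacci_like_sequences_alt a b c d e f g h_ n
instance (a : Int) (b : Int) (c : Int) (d : Int) (e : Int) (f : Int) (g : Int) (h_ : Int) (n : Int) (out : Int × Int) : Decidable (Spec_compute_fibonacci_like_sequences a b c d e f g h_ n out) := by unfold Spec_compute_fibonacci_like_sequences; infer_instance

-- ===== CLAIM (what is proved, stated in full; the proofs are below) =====
def Claim_equal_compute_fibonacci_like_sequences : Prop := ∀ (a : Int) (b : Int) (c : Int) (d : Int) (e : Int) (f : Int) (g : Int) (h_ : Int) (n : Int), Dom_compute_fibonacci_like_sequences a b c d e f g h_ n → Pre_compute_fibonacci_like_sequences a b c d e f g h_ n → Spec_compute_fibonacci_like_sequences a b c d e f g h_ n (compute_fibonacci_like_sequences a b c d e f g h_ n)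

-- ===== LEMMAS AND PROOFS =====

-- Both sides are interpreted as matrices/vectors over ZMod 10^9.
def pvToM (m : List (List Int)) : Matrix (Fin 22) (Fin 22) (ZMod 1000000000) :=
  Matrix.of fun i j => (((m[i.1]!)[j.1]! : Int) : ZMod 1000000000)

def pvToV (v : List Int) : Fin 22 → ZMod 1000000000 := fun i => ((v[i.1]! : Int) : ZMod 1000000000)

def pvSh (m : List (List Int)) : Prop := m.length = 22 ∧ ∀ r ∈ m, r.length = 22

-- value of a bit string processed MSB-first starting from accumulator acc
def pvVal (acc : Nat) (cs : List Char) : Nat :=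
  cs.foldl (fun v ch => 2 * v + (if ch = '1' then 1 else 0)) acc

lemma pvCastMod (x : Int) : ((PySem.Int.mod x 1000000000 : Int) : ZMod 1000000000) = (x : ZMod 1000000000) := by
  rw [PySem.Int.mod_eq_emod_of_pos (by norm_num)]
  have h1 : (1000000000 : ZMod 1000000000) = 0 := by
    simpa using ZMod.natCast_self 1000000000
  rw [Int.emod_def]
  push_cast
  rw [h1]
  ring

lemma pvModCongr (x y : Int) (hxy : (x : ZMod 1000000000) = (y : ZMod 1000000000)) :
    PySem.Int.mod x 1000000000 = PySem.Int.mod y 1000000000 := by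
  rw [PySem.Int.mod_eq_emod_of_pos (by norm_num), PySem.Int.mod_eq_emod_of_pos (by norm_num)]
  have h := (ZMod.intCast_eq_intCast_iff' x y 1000000000).mp hxy
  simpa [Int.ModEq] using h

lemma pvGetMap {α β : Type} [Inhabited α] [Inhabited β] (l : List α) (fn : α → β) (i : Nat)
    (hi : i < l.length) : (l.map fn)[i]! = fn (l[i]!) := by
  rw [getElem!_pos (l.map fn) i (by simpa using hi), getElem!_pos l i hi]
  simp

lemma pvGetRangeMap {β : Type} [Inhabited β] (nn : Nat) (fn : Nat → β) (i : Nat) (hi : i < nn) :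
    ((List.range nn).map fn)[i]! = fn i := by
  rw [pvGetMap _ _ _ (by simpa using hi), getElem!_pos (List.range nn) i (by simpa using hi)]
  simp

lemma pvGetMem {α : Type} [Inhabited α] (l : List α) (i : Nat) (hi : i < l.length) : l[i]! ∈ l := by
  rw [getElem!_pos l i hi]
  exact List.getElem_mem hi

lemma pvSumRange (fn : Nat → Int) (nn : Nat) :
    ((List.range nn).map fn).sum = ∑ j ∈ Finset.range nn, fn j := by
  induction nn with
  | zero => simp
  | succ k ih => simp [List.range_succ, Finset.sum_range_succ, ih]

lemma pvZipSum : ∀ (r c : List Int), r.length = c.length →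
    (List.zipWith (fun x y => x * y) r c).sum = ∑ j ∈ Finset.range r.length, getElem! r j * getElem! c j := by
  intro r
  induction r with
  | nil => intro c h; simp
  | cons x xs ih =>
    intro c h
    cases c with
    | nil => simp at h
    | cons y ys =>
      have h' : xs.length = ys.length := by simpa using h
      simp only [List.zipWith_cons_cons, List.sum_cons, List.length_cons]
      rw [Finset.sum_range_succ', ih ys h']
      simp [add_comm]

lemma pvZipStar_eq : ∀ (L : Nat) (m : List (List Int)), m ≠ [] → (∀ r ∈ m, r.length = L) →
    pvZipStar m = (List.range L).map (fun j => m.map (fun r => getElem! r j)) := by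
  intro L
  induction L with
  | zero =>
    intro m hne hlen
    rw [pvZipStar]
    have hc : ¬ (m ≠ [] ∧ ∀ r ∈ m, r ≠ []) := by
      rintro ⟨h1, h2⟩
      cases m with
      | nil => exact h1 rfl
      | cons x xs =>
        have hx0 : x.length = 0 := hlen x (List.mem_cons_self ..)
        exact h2 x (List.mem_cons_self ..) (List.length_eq_zero_iff.mp hx0)
    simp [hc]
  | succ L ih =>
    intro m hne hlen
    have hc : m ≠ [] ∧ ∀ r ∈ m, r ≠ [] := by
      refine ⟨hne, fun r hr => ?_⟩
      have := hlen r hr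
      intro h0
      simp [h0] at this
    rw [pvZipStar, dif_pos hc]
    have h2 : ∀ r ∈ m.map List.tail, r.length = L := by
      intro r hr
      simp only [List.mem_map] at hr
      obtain ⟨s, hs, rfl⟩ := hr
      have := hlen s hs
      simp [List.length_tail, this]
    rw [ih (m.map List.tail) (fun hh => hne (List.map_eq_nil_iff.mp hh)) h2]
    rw [List.range_succ_eq_map]
    simp only [List.map_cons, List.map_map]
    congr 1
    · apply List.map_congr_left
      intro r hr
      have hrl := hlen r hr
      cases r with
      | nil => simp at hrl
      | cons a t => simp [List.headI]
    · apply List.map_congr_left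
      intro j hj
      simp only [Function.comp]
      apply List.map_congr_left
      intro r hr
      have hrl := hlen r hr
      cases r with
      | nil => simp at hrl
      | cons a t => simp

lemma pvSh_matMult (m1 m2 : List (List Int)) (dd : Int) (h1 : pvSh m1) (h2 : pvSh m2) :
    pvSh (pvMatMult m1 m2 dd) := by
  obtain ⟨h1l, h1r⟩ := h1
  obtain ⟨h2l, h2r⟩ := h2
  have hz := pvZipStar_eq 22 m2 (by intro h0; simp [h0] at h2l) h2r
  constructor
  · simp [pvMatMult, h1l]
  · intro r hr
    simp only [pvMatMult, List.mem_map] at hr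
    obtain ⟨row, _, rfl⟩ := hr
    simp [hz]

lemma pvToM_matMult (m1 m2 : List (List Int)) (h1 : pvSh m1) (h2 : pvSh m2) :
    pvToM (pvMatMult m1 m2 1000000000) = pvToM m1 * pvToM m2 := by
  obtain ⟨h1l, h1r⟩ := h1
  obtain ⟨h2l, h2r⟩ := h2
  have hz := pvZipStar_eq 22 m2 (by intro h0; simp [h0] at h2l) h2r
  ext i j
  have hi : i.1 < m1.length := by omega
  have hrowlen : (m1[i.1]!).length = 22 := h1r _ (pvGetMem m1 i.1 hi)
  have hcollen : (m2.map (fun r => getElem! r j.1)).length = 22 := by simp [h2l]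
  simp only [pvToM, pvMatMult, Matrix.of_apply, hz]
  rw [pvGetMap _ _ _ hi, List.map_map, pvGetRangeMap _ _ _ (by omega)]
  simp only [Function.comp]
  rw [pvCastMod, pvZipSum _ _ (by rw [hrowlen, hcollen]), hrowlen]
  rw [Matrix.mul_apply]
  simp only [Matrix.of_apply]
  have hR : (∑ x : Fin 22, (((m1[i.1]!)[x.1]! : Int) : ZMod 1000000000) * (((m2[x.1]!)[j.1]! : Int) : ZMod 1000000000)) =
      ∑ k ∈ Finset.range 22, (((m1[i.1]!)[k]! : Int) : ZMod 1000000000) * (((m2[k]!)[j.1]! : Int) : ZMod 1000000000) :=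
    Fin.sum_univ_eq_sum_range
      (fun kk => (((m1[i.1]!)[kk]! : Int) : ZMod 1000000000) * (((m2[kk]!)[j.1]! : Int) : ZMod 1000000000)) 22
  rw [hR]
  push_cast
  apply Finset.sum_congr rfl
  intro k hk
  have hk' : k < 22 := Finset.mem_range.mp hk
  rw [pvGetMap m2 (fun r => getElem! r j.1) k (by omega)]

lemma pvToM_altMul (p q : List (List Int)) :
    pvToM (pvAltMatMul p q 1000000000) = pvToM p * pvToM q := by
  ext i j
  simp only [pvToM, pvAltMatMul, Matrix.of_apply]
  rw [pvGetRangeMap _ _ _ (by omega), pvGetRangeMap _ _ _ (by omega), pvCastMod, pvSumRange]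
  rw [Matrix.mul_apply]
  simp only [Matrix.of_apply]
  have hR : (∑ x : Fin 22, (((p[i.1]!)[x.1]! : Int) : ZMod 1000000000) * (((q[x.1]!)[j.1]! : Int) : ZMod 1000000000)) =
      ∑ k ∈ Finset.range 22, (((p[i.1]!)[k]! : Int) : ZMod 1000000000) * (((q[k]!)[j.1]! : Int) : ZMod 1000000000) :=
    Fin.sum_univ_eq_sum_range
      (fun kk => (((p[i.1]!)[kk]! : Int) : ZMod 1000000000) * (((q[kk]!)[j.1]! : Int) : ZMod 1000000000)) 22
  rw [hR]
  push_cast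
  rfl

lemma pvToV_altVec (p : List (List Int)) (u : List Int) :
    pvToV (pvAltMatVec p u 1000000000) = (pvToM p).mulVec (pvToV u) := by
  funext i
  simp only [pvToV, pvAltMatVec]
  rw [pvGetRangeMap _ _ _ (by omega), pvCastMod, pvSumRange]
  simp only [Matrix.mulVec, dotProduct]
  have hR : (∑ x : Fin 22, pvToM p i x * pvToV u x) =
      ∑ k ∈ Finset.range 22, (((p[i.1]!)[k]! : Int) : ZMod 1000000000) * ((u[k]! : Int) : ZMod 1000000000) :=
    Fin.sum_univ_eq_sum_range
      (fun kk => (((p[i.1]!)[kk]! : Int) : ZMod 1000000000) * ((u[kk]! : Int) : ZMod 1000000000)) 22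
  rw [hR]
  push_cast
  rfl

lemma pvToV_matVec (m : List (List Int)) (v : List Int) (hm : pvSh m) (hv : v.length = 22) :
    pvToV (pvMatVecMult m v) = (pvToM m).mulVec (pvToV v) := by
  obtain ⟨hml, hmr⟩ := hm
  funext i
  have hi : i.1 < m.length := by omega
  have hrowlen : (m[i.1]!).length = 22 := hmr _ (pvGetMem m i.1 hi)
  simp only [pvToV, pvMatVecMult]
  rw [pvGetMap _ _ _ hi, pvZipSum _ _ (by rw [hrowlen, hv]), hrowlen]
  simp only [Matrix.mulVec, dotProduct]
  have hR : (∑ x : Fin 22, pvToM m i x * pvToV v x) =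
      ∑ k ∈ Finset.range 22, (((m[i.1]!)[k]! : Int) : ZMod 1000000000) * ((v[k]! : Int) : ZMod 1000000000) :=
    Fin.sum_univ_eq_sum_range
      (fun kk => (((m[i.1]!)[kk]! : Int) : ZMod 1000000000) * ((v[kk]! : Int) : ZMod 1000000000)) 22
  rw [hR]
  push_cast
  rfl

lemma pvId_sh : pvSh ((List.range 22).map (fun i => (List.range 22).map (fun j => if i = j then (1 : Int) else 0))) := by
  constructor
  · simp
  · intro r hr
    simp only [List.mem_map] at hr
    obtain ⟨k, _, rfl⟩ := hr
    simp

lemma pvId_toM : pvToM ((List.range 22).map (fun i => (List.range 22).map (fun j => if i = j then (1 : Int) else 0))) = 1 := by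
  ext i j
  simp only [pvToM, Matrix.of_apply]
  rw [pvGetRangeMap _ _ _ (by omega), pvGetRangeMap _ _ _ (by omega)]
  rw [Matrix.one_apply]
  by_cases hij : i = j
  · simp [hij]
  · have : i.1 ≠ j.1 := fun h => hij (Fin.ext h)
    simp [hij, this]

lemma pvFoldInv (mat : List (List Int)) (hm : pvSh mat) :
    ∀ (cs : List Char) (cur : List (List Int)) (ee : Nat), pvSh cur → pvToM cur = (pvToM mat) ^ ee →
      pvSh (cs.foldl (fun cur c =>
          let cur2 := pvMatMult cur cur 1000000000
          if c = '1' then pvMatMult cur2 mat 1000000000 else cur2) cur) ∧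
      pvToM (cs.foldl (fun cur c =>
          let cur2 := pvMatMult cur cur 1000000000
          if c = '1' then pvMatMult cur2 mat 1000000000 else cur2) cur) = (pvToM mat) ^ (pvVal ee cs) := by
  intro cs
  induction cs with
  | nil =>
    intro cur ee hsh htm
    exact ⟨hsh, by simpa [pvVal] using htm⟩
  | cons ch cs ih =>
    intro cur ee hsh htm
    simp only [List.foldl_cons]
    have hsq : pvSh (pvMatMult cur cur 1000000000) := pvSh_matMult _ _ _ hsh hsh
    have hsqM : pvToM (pvMatMult cur cur 1000000000) = (pvToM mat) ^ (2 * ee) := by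
      rw [pvToM_matMult _ _ hsh hsh, htm, ← pow_add, two_mul]
    by_cases hch : ch = '1'
    · have h3 : pvSh (pvMatMult (pvMatMult cur cur 1000000000) mat 1000000000) :=
        pvSh_matMult _ _ _ hsq hm
      have h4 : pvToM (pvMatMult (pvMatMult cur cur 1000000000) mat 1000000000) =
          (pvToM mat) ^ (2 * ee + 1) := by
        rw [pvToM_matMult _ _ hsq hm, hsqM, ← pow_succ]
      have := ih _ (2 * ee + 1) h3 h4
      simpa [hch, pvVal] using this
    · have := ih _ (2 * ee) hsq hsqM
      simpa [hch, pvVal] using this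

lemma pvBinNat_val : ∀ m : Nat, pvVal 0 (pvBinNat m) = m := by
  intro m
  induction m using Nat.strong_induction_on with
  | _ m ih =>
    rw [pvBinNat]
    by_cases h : m < 2
    · rw [if_pos h]
      interval_cases m <;> simp [pvVal]
    · rw [if_neg h]
      have hrec := ih (m / 2) (Nat.div_lt_self (by omega) (by omega))
      simp only [pvVal, List.foldl_append, List.foldl_cons, List.foldl_nil] at hrec ⊢
      rw [hrec]
      rcases Nat.mod_two_eq_zero_or_one m with h2 | h2 <;> simp [h2] <;> omega

lemma pvLoopInv : ∀ (k : Nat) (base : List (List Int)) (v : List Int),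
    pvToV (pvAltLoop base v k 1000000000) = ((pvToM base) ^ k).mulVec (pvToV v) := by
  intro k
  induction k using Nat.strong_induction_on with
  | _ k ih =>
    intro base v
    rw [pvAltLoop]
    by_cases hk : k = 0
    · simp [hk, Matrix.one_mulVec]
    · rw [if_neg hk]
      rw [ih (k / 2) (Nat.div_lt_self (by omega) (by omega))]
      rw [pvToM_altMul]
      by_cases h2 : k % 2 = 1
      · rw [if_pos h2, pvToV_altVec]
        have hpow : (pvToM base * pvToM base) ^ (k / 2) * pvToM base = (pvToM base) ^ k := by
          rw [← pow_two, ← pow_mul, ← pow_succ]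
          congr 1
          omega
        rw [← hpow, ← Matrix.mulVec_mulVec]
      · rw [if_neg h2]
        have hpow : (pvToM base * pvToM base) ^ (k / 2) = (pvToM base) ^ k := by
          rw [← pow_two, ← pow_mul]
          congr 1
          omega
        rw [hpow]

lemma pvSh_setAt (m : List (List Int)) (i j : Nat) (v : Int) (hi : i < 22) (h : pvSh m) :
    pvSh (pvSetAt m i j v) := by
  obtain ⟨hl, hr⟩ := h
  constructor
  · simp [pvSetAt, hl]
  · intro r hrm
    rcases List.mem_or_eq_of_mem_set hrm with hcase | hcase
    · exact hr r hcase
    · subst hcase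
      rw [List.length_set]
      exact hr _ (pvGetMem m i (by omega))

lemma pvSh_rowAdd (m m' : List (List Int)) (i : Nat) (j : Int) (hi : i < 22) (h : pvSh m)
    (hm : pvRowAdd m i j = some m') : pvSh m' := by
  obtain ⟨hl, hr⟩ := h
  unfold pvRowAdd at hm
  cases hget : PySem.List.pyGet? (m[i]!) j with
  | none => rw [hget] at hm; cases hm
  | some x =>
    rw [hget] at hm
    rw [Option.map_eq_some_iff] at hm
    obtain ⟨r, hset, rfl⟩ := hm
    have hlen : r.length = (m[i]!).length := by
      have h5 := PySem.List.length_pySetD (m[i]!) j (x + 1)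
      have h6 : PySem.List.pySetD (m[i]!) j (x + 1) = r := by
        rw [PySem.List.pySetD, hset]
        rfl
      rw [h6] at h5
      exact h5
    constructor
    · simp [hl]
    · intro r' hr'
      rcases List.mem_or_eq_of_mem_set hr' with hcase | hcase
      · exact hr r' hcase
      · subst hcase
        rw [hlen]
        exact hr _ (pvGetMem m i (by omega))

lemma pvMatData_sh (a b c d e f g h_ : Int) (mat : List (List Int))
    (hm : pvMatData a b c d e f g h_ = some mat) : pvSh mat := by
  have h0 : pvSh (List.replicate 22 (List.replicate 22 (0 : Int))) := by
    constructor
    · simp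
    · intro r hr
      simp [List.eq_of_mem_replicate hr]
  simp only [pvMatData] at hm
  split at hm
  next => simp at hm
  next m1 hA =>
  split at hm
  next => simp at hm
  next m2 hB =>
  split at hm
  next => simp at hm
  next m3 hC =>
  split at hm
  next => simp at hm
  next m4 hE =>
  split at hm
  next => simp at hm
  next m5 hF =>
  split at hm
  next => simp at hm
  next m6 hG =>
  have hs1 : pvSh m1 := by
    refine pvSh_rowAdd _ _ _ _ (by decide) ?_ hA
    repeat' apply pvSh_setAt
    all_goals first | exact h0 | decide
  have hs2 : pvSh m2 := pvSh_rowAdd _ _ _ _ (by decide) hs1 hB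
  have hs3 : pvSh m3 := pvSh_rowAdd _ _ _ _ (by decide) hs2 hC
  have hs4 : pvSh m4 := by
    refine pvSh_rowAdd _ _ _ _ (by decide) ?_ hE
    repeat' apply pvSh_setAt
    all_goals first | exact hs3 | decide
  have hs5 : pvSh m5 := pvSh_rowAdd _ _ _ _ (by decide) hs4 hF
  have hs6 : pvSh m6 := pvSh_rowAdd _ _ _ _ (by decide) hs5 hG
  have hmat : mat = pvSetAt (pvSetAt (pvSetAt (pvSetAt (pvSetAt m6 19 20 h_)
      19 21 h_) 20 20 h_) 20 21 h_) 21 21 h_ := (Option.some.injEq _ _ ▸ hm).symm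
  rw [hmat]
  repeat' apply pvSh_setAt
  all_goals first | exact hs6 | decide

lemma pvVecData_len : pvVecData.length = 22 := by
  simp [pvVecData]

-- ===== VERDICT (by name: the statement is the Claim_ definition above) =====
theorem compute_fibonacci_like_sequences_spec : Claim_equal_compute_fibonacci_like_sequences := by
  unfold Claim_equal_compute_fibonacci_like_sequences
  intro a b c d e f g h_ n hDom hPre
  unfold Spec_compute_fibonacci_like_sequences
  obtain ⟨-, -, -, -, -, -, -, -, -, -, -, -, hn⟩ := hPre
  unfold compute_fibonacci_like_sequences compute_fibonacci_like_sequences_alt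
  cases hmat : pvMatData a b c d e f g h_ with
  | none => rfl
  | some mat =>
    have hsh := pvMatData_sh a b c d e f g h_ mat hmat
    have hmod : (10 : Int) ^ 9 = 1000000000 := by norm_num
    dsimp only [pvMatPowMod]
    rw [hmod, hsh.1]
    have hfold := pvFoldInv mat hsh (pvBinTail n)
      ((List.range 22).map (fun i => (List.range 22).map (fun j => if i = j then (1 : Int) else 0)))
      0 pvId_sh (by rw [pvId_toM, pow_zero])
    have hvalbits : pvVal 0 (pvBinTail n) = n.toNat := by
      rw [pvBinTail, if_neg (by omega)]
      exact pvBinNat_val n.toNat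
    have hA : pvToV (pvMatVecMult ((pvBinTail n).foldl (fun cur c =>
        let cur2 := pvMatMult cur cur 1000000000
        if c = '1' then pvMatMult cur2 mat 1000000000 else cur2)
        ((List.range 22).map (fun i => (List.range 22).map (fun j => if i = j then (1 : Int) else 0))))
        pvVecData) = ((pvToM mat) ^ n.toNat).mulVec (pvToV pvVecData) := by
      rw [pvToV_matVec _ _ hfold.1 pvVecData_len, hfold.2, hvalbits]
    have hB := pvLoopInv n.toNat mat pvVecData
    have hAB := hA.trans hB.symm
    have h8 := congrFun hAB ⟨8, by decide⟩
    have h19 := congrFun hAB ⟨19, by decide⟩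
    simp only [pvToV] at h8 h19
    exact Prod.ext (pvModCongr _ _ h8) (pvModCongr _ _ h19)
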